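-- pv_equiv track=rewrite | github.com/boris-volkov/Python | math/binary_clock.py | lights_counter
-- ===== SOURCE A (Python) =====
-- one = "▉"
--
-- zero = " "
--
-- def lights_counter(x):
--     row = ""
--     for i in reversed(range(16)):
--         if x & 2**i:
--             row += one
--         else:
--             row += zero
--     return row
-- ===== SOURCE B (Python) =====
-- one = "▉"
--
-- zero = " "
--
-- _TRANS = str.maketrans("10", one + zero)
--
-- def lights_counter(x):
--     return format(x & 0xFFFF, "016b").translate(_TRANS)
-- ===== Notes on version B (the rewrite author's own statement) =====
-- stated objective: idiomatic
-- what changed: Replaces the per-bit test loop with string concatenation by a single format(x & 0xFFFF, '016b') call followed by str.translate mapping the digit characters to the block/space glyphs.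
import Mathlib
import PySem

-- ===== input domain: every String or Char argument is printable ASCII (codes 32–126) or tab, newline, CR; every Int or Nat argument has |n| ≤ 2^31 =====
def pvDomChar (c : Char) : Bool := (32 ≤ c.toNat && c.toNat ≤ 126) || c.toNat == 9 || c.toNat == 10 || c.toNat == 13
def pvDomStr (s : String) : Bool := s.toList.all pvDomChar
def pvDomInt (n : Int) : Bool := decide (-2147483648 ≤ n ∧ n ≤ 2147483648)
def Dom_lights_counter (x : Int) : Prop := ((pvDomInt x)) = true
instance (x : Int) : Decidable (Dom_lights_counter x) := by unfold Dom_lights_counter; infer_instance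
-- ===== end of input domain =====

-- B renders the low 16 bits via format(x & 0xFFFF, '016b') + str.translate instead of A's
-- per-bit loop with masking and string concatenation (objective: idiomatic; return value only).

-- ===== PORT A =====
-- one = "▉" / zero = " " (module constants), as 1-char lists; strings are built as List Char
def pvOne : List Char := ['▉']
def pvZero : List Char := [' ']

def lights_counter (x : Int) : String :=
  String.ofList
    (((PySem.List.pyRange 0 16 1).reverse).foldl
      (fun row i => row ++ (if PySem.Int.band x ((2:Int) ^ i.toNat) ≠ 0 then pvOne else pvZero))
      [])

-- ===== PORT B =====
-- format(m, '016b') digit list: 16 binary digits, most significant first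
def pvBinDigits : Nat → Nat → List Nat
  | 0, _ => []
  | k+1, m => pvBinDigits k (m / 2) ++ [m % 2]

-- str.translate(str.maketrans('10', '▉ '))
def pvTranslate (c : Char) : Char := if c = '1' then '▉' else if c = '0' then ' ' else c

def lights_counter_alt (x : Int) : String :=
  String.ofList
    (((pvBinDigits 16 (PySem.Int.band x 65535).toNat).map
        (fun d => if d = 1 then '1' else '0')).map pvTranslate)

-- ===== PRECONDITION & SPEC =====
def Spec_lights_counter (x : Int) (out : String) : Prop := out = lights_counter_alt x
instance (x : Int) (out : String) : Decidable (Spec_lights_counter x out) := by unfold Spec_lights_counter; infer_instance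

-- ===== CLAIM (what is proved, stated in full; the proofs are below) =====
def Claim_equal_lights_counter : Prop := ∀ (x : Int), Dom_lights_counter x → Spec_lights_counter x (lights_counter x)

-- ===== LEMMAS AND PROOFS =====

-- bit i of A's test agrees with bit i of (x & 0xFFFF) for i < 16 (Python two's complement)
lemma pv_bit (x : Int) (i : Nat) (h : i < 16) :
    (PySem.Int.band x (2^i) ≠ 0) ↔ ((PySem.Int.band x 65535).toNat / 2^i % 2 = 1) := by
  have h2 : ((2:Int)^i) = ((2^i : Nat) : Int) := by push_cast; ring
  have h6 : Int.toNat 65535 = 65535 := by decide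
  unfold PySem.Int.band
  by_cases hx : 0 ≤ x
  · rw [if_pos hx, if_pos hx, if_pos (by positivity), if_pos (by norm_num), h2]
    simp only [Int.toNat_natCast, h6]
    rw [Nat.and_two_pow, (by norm_num : (65535:Nat) = 2^16 - 1), Nat.and_two_pow_sub_one_eq_mod]
    rw [Nat.testBit_eq_decide_div_mod_eq]
    set n := x.toNat
    by_cases hb : n / 2^i % 2 = 1 <;> simp [hb] <;> interval_cases i <;> omega
  · rw [if_neg hx, if_neg hx, if_pos (by positivity), if_pos (by norm_num), h2]
    simp only [Int.toNat_natCast, h6]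
    set n := (-x - 1).toNat
    rw [Nat.land_comm, Nat.and_two_pow, Nat.land_comm 65535,
      (by norm_num : (65535:Nat) = 2^16 - 1), Nat.and_two_pow_sub_one_eq_mod]
    rw [Nat.testBit_eq_decide_div_mod_eq]
    by_cases hb : n / 2^i % 2 = 1 <;> simp [hb] <;> interval_cases i <;> omega

-- per-position character agreement
lemma pv_chr (x : Int) (i : Nat) (h : i < 16) :
    (if PySem.Int.band x (2^i) ≠ 0 then '▉' else ' ')
      = pvTranslate (if (PySem.Int.band x 65535).toNat / 2^i % 2 = 1 then '1' else '0') := by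
  by_cases hb : (PySem.Int.band x 65535).toNat / 2^i % 2 = 1
  · rw [if_pos hb, if_pos ((pv_bit x i h).mpr hb)]; rfl
  · rw [if_neg hb, if_neg (fun hc => hb ((pv_bit x i h).mp hc))]; rfl

-- format '0kb' produces the digits m / 2^j % 2, most significant first
lemma pvBinDigits_eq (k : Nat) : ∀ m, pvBinDigits k m
    = (List.range k).reverse.map (fun j => m / 2^j % 2) := by
  induction k with
  | zero => intro m; rfl
  | succ k ih =>
    intro m
    rw [pvBinDigits, ih (m / 2), List.range_succ_eq_map, List.reverse_cons, List.map_append,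
      ← List.map_reverse, List.map_map]
    congr 1
    · rw [List.map_reverse, List.map_reverse]
      congr 1
      apply List.map_congr_left
      intro j _
      simp only [Function.comp_apply, Nat.succ_eq_add_one, pow_succ']
      rw [Nat.div_div_eq_div_mul]
    · simp

-- ===== VERDICT (by name: the statement is the Claim_ definition above) =====
theorem lights_counter_spec : Claim_equal_lights_counter := by
  intro x _
  unfold Spec_lights_counter lights_counter lights_counter_alt
  have hfun : (fun (row : List Char) (i : Int) =>
        row ++ (if PySem.Int.band x ((2:Int) ^ i.toNat) ≠ 0 then pvOne else pvZero))
      = (fun row i => row ++ [if PySem.Int.band x ((2:Int) ^ i.toNat) ≠ 0 then '▉' else ' ']) := by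
    funext row i; split_ifs <;> rfl
  rw [hfun, PySem.List.foldl_append_singleton_eq_map, pvBinDigits_eq, List.map_map]
  rw [show (PySem.List.pyRange 0 16 1).reverse
        = List.map (Nat.cast : Nat → Int) (List.range 16).reverse from by decide]
  rw [List.map_map, List.nil_append]
  rw [List.map_map]
  congr 1
  apply List.map_congr_left
  intro j hj
  have hj16 : j < 16 := by
    have := List.mem_reverse.mp hj
    exact List.mem_range.mp this
  simp only [Function.comp_apply, Int.toNat_natCast]
  exact pv_chr x j hj16
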